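-- pv_equiv track=rewrite | github.com/shinianyunyan/txCloudCVMCract | ui/main_window.py | _categorize_images
-- ===== SOURCE A (Python) =====
-- def _categorize_images(images):
--     """按平台归类镜像"""
--     buckets = {}
--     for img in images or []:
--         platform = (img.get("Platform") or "OTHER").upper()
--         if platform.startswith("WINDOWS"):
--             key = "WINDOWS"
--         elif platform.startswith("UBUNTU"):
--             key = "UBUNTU"
--         elif platform.startswith("CENTOS"):
--             key = "CENTOS"
--         elif platform.startswith("DEBIAN"):
--             key = "DEBIAN"
--         elif platform.startswith("REDHAT") or platform.startswith("RED HAT"):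
--             key = "REDHAT"
--         elif platform.startswith("SUSE") or platform.startswith("OPENSUSE"):
--             key = "SUSE"
--         elif platform.startswith("TENCENT"):
--             key = "TENCENTOS"
--         elif platform.startswith("OPENCLOUD"):
--             key = "OPENCLOUDOS"
--         elif platform.startswith("ALMA"):
--             key = "ALMALINUX"
--         elif platform.startswith("ROCKY"):
--             key = "ROCKY"
--         elif platform.startswith("FEDORA"):
--             key = "FEDORA"
--         elif platform.startswith("FREEBSD"):
--             key = "FREEBSD"
--         elif platform.startswith("COREOS"):
--             key = "COREOS"
--         else:
--             key = "OTHER"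
--         buckets.setdefault(key, []).append(img)
--     return buckets
-- ===== SOURCE B (Python) =====
-- _TABLE = [
--     ("WINDOWS", "WINDOWS"),
--     ("UBUNTU", "UBUNTU"),
--     ("CENTOS", "CENTOS"),
--     ("DEBIAN", "DEBIAN"),
--     ("REDHAT", "REDHAT"),
--     ("RED HAT", "REDHAT"),
--     ("SUSE", "SUSE"),
--     ("OPENSUSE", "SUSE"),
--     ("TENCENT", "TENCENTOS"),
--     ("OPENCLOUD", "OPENCLOUDOS"),
--     ("ALMA", "ALMALINUX"),
--     ("ROCKY", "ROCKY"),
--     ("FEDORA", "FEDORA"),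
--     ("FREEBSD", "FREEBSD"),
--     ("COREOS", "COREOS"),
-- ]
--
--
-- def _key_for(img):
--     platform = (img.get("Platform") or "OTHER").upper()
--     return next((key for pfx, key in _TABLE if platform.startswith(pfx)), "OTHER")
--
--
-- def _categorize_images(images):
--     imgs = list(images or [])
--     keys = [_key_for(img) for img in imgs]
--     return {k: [img for img, kk in zip(imgs, keys) if kk == k]
--             for k in dict.fromkeys(keys)}
-- ===== Notes on version B (the rewrite author's own statement) =====
-- stated objective: alternative
-- what changed: Replaces the 14-branch if/elif chain by a first-match prefix table and replaces the incremental setdefault/append loop by a two-pass group-by: compute all keys once, dedup them with dict.fromkeys, and build each bucket by filtering.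
import Mathlib
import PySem

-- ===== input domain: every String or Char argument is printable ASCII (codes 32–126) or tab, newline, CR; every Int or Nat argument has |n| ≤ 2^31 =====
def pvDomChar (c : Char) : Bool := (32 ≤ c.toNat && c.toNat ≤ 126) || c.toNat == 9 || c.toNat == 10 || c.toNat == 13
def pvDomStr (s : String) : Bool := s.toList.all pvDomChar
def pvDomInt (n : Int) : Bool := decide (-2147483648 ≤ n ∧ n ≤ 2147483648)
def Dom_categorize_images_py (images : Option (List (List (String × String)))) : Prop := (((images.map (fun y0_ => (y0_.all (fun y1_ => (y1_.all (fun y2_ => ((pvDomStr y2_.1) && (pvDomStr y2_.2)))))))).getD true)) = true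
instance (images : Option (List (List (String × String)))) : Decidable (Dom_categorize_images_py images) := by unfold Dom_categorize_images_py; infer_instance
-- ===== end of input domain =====

-- B replaces A's 14-branch if/elif chain by a first-match prefix table and A's incremental
-- setdefault/append loop by a two-pass group-by (compute all keys, dedup, filter per key).

-- ===== PORT A =====
-- platform = (img.get("Platform") or "OTHER").upper()   (shared by both Pythons)
def pvPlatform (img : List (String × String)) : String :=
  PySem.Str.upper
    (match (PySem.Dict.mk img).get? "Platform" with
     | some s => if s = "" then "OTHER" else s
     | none => "OTHER")

def categorize_images_py (images : Option (List (List (String × String)))) : List (String × List (List (String × String))) :=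
  ((images.getD []).foldl
    (fun buckets img =>
      let platform := pvPlatform img
      let key :=
        if PySem.Str.startswith platform "WINDOWS" then "WINDOWS"
        else if PySem.Str.startswith platform "UBUNTU" then "UBUNTU"
        else if PySem.Str.startswith platform "CENTOS" then "CENTOS"
        else if PySem.Str.startswith platform "DEBIAN" then "DEBIAN"
        else if PySem.Str.startswith platform "REDHAT" || PySem.Str.startswith platform "RED HAT" then "REDHAT"
        else if PySem.Str.startswith platform "SUSE" || PySem.Str.startswith platform "OPENSUSE" then "SUSE"
        else if PySem.Str.startswith platform "TENCENT" then "TENCENTOS"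
        else if PySem.Str.startswith platform "OPENCLOUD" then "OPENCLOUDOS"
        else if PySem.Str.startswith platform "ALMA" then "ALMALINUX"
        else if PySem.Str.startswith platform "ROCKY" then "ROCKY"
        else if PySem.Str.startswith platform "FEDORA" then "FEDORA"
        else if PySem.Str.startswith platform "FREEBSD" then "FREEBSD"
        else if PySem.Str.startswith platform "COREOS" then "COREOS"
        else "OTHER"
      -- buckets.setdefault(key, []).append(img)
      buckets.modify key [] (fun l => l ++ [img]))
    PySem.Dict.empty).items

-- ===== PORT B =====
def pvTable : List (String × String) :=
  [("WINDOWS", "WINDOWS"), ("UBUNTU", "UBUNTU"), ("CENTOS", "CENTOS"), ("DEBIAN", "DEBIAN"),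
   ("REDHAT", "REDHAT"), ("RED HAT", "REDHAT"), ("SUSE", "SUSE"), ("OPENSUSE", "SUSE"),
   ("TENCENT", "TENCENTOS"), ("OPENCLOUD", "OPENCLOUDOS"), ("ALMA", "ALMALINUX"),
   ("ROCKY", "ROCKY"), ("FEDORA", "FEDORA"), ("FREEBSD", "FREEBSD"), ("COREOS", "COREOS")]

-- next((key for pfx, key in _TABLE if platform.startswith(pfx)), "OTHER")
def pvKeyFor (img : List (String × String)) : String :=
  let platform := pvPlatform img
  ((pvTable.find? (fun e => PySem.Str.startswith platform e.1)).map (·.2)).getD "OTHER"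

def categorize_images_py_alt (images : Option (List (List (String × String)))) : List (String × List (List (String × String))) :=
  let imgs := images.getD []
  let keys := imgs.map pvKeyFor
  (PySem.List.dedup keys).map
    (fun k => (k, ((imgs.zip keys).filter (fun p => p.2 == k)).map (fun p => p.1)))

-- ===== PRECONDITION & SPEC =====
def Spec_categorize_images_py (images : Option (List (List (String × String)))) (out : List (String × List (List (String × String)))) : Prop := out = categorize_images_py_alt images
instance (images : Option (List (List (String × String)))) (out : List (String × List (List (String × String)))) : Decidable (Spec_categorize_images_py images out) := by unfold Spec_categorize_images_py; infer_instance

-- ===== CLAIM (what is proved, stated in full; the proofs are below) =====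
def Claim_equal_categorize_images_py : Prop := ∀ (images : Option (List (List (String × String)))), Dom_categorize_images_py images → Spec_categorize_images_py images (categorize_images_py images)

-- ===== LEMMAS AND PROOFS =====

-- A's if/elif chain is the first match of B's prefix table.
theorem pv_key_chain_eq (p : String) :
    (if PySem.Str.startswith p "WINDOWS" then "WINDOWS"
     else if PySem.Str.startswith p "UBUNTU" then "UBUNTU"
     else if PySem.Str.startswith p "CENTOS" then "CENTOS"
     else if PySem.Str.startswith p "DEBIAN" then "DEBIAN"
     else if PySem.Str.startswith p "REDHAT" || PySem.Str.startswith p "RED HAT" then "REDHAT"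
     else if PySem.Str.startswith p "SUSE" || PySem.Str.startswith p "OPENSUSE" then "SUSE"
     else if PySem.Str.startswith p "TENCENT" then "TENCENTOS"
     else if PySem.Str.startswith p "OPENCLOUD" then "OPENCLOUDOS"
     else if PySem.Str.startswith p "ALMA" then "ALMALINUX"
     else if PySem.Str.startswith p "ROCKY" then "ROCKY"
     else if PySem.Str.startswith p "FEDORA" then "FEDORA"
     else if PySem.Str.startswith p "FREEBSD" then "FREEBSD"
     else if PySem.Str.startswith p "COREOS" then "COREOS"
     else "OTHER") =
    ((pvTable.find? (fun e => PySem.Str.startswith p e.1)).map (·.2)).getD "OTHER" := by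
  simp only [pvTable, List.find?_cons, List.find?_nil]
  generalize PySem.Str.startswith p "WINDOWS" = b1
  generalize PySem.Str.startswith p "UBUNTU" = b2
  generalize PySem.Str.startswith p "CENTOS" = b3
  generalize PySem.Str.startswith p "DEBIAN" = b4
  generalize PySem.Str.startswith p "REDHAT" = b5
  generalize PySem.Str.startswith p "RED HAT" = b6
  generalize PySem.Str.startswith p "SUSE" = b7
  generalize PySem.Str.startswith p "OPENSUSE" = b8
  generalize PySem.Str.startswith p "TENCENT" = b9
  generalize PySem.Str.startswith p "OPENCLOUD" = b10
  generalize PySem.Str.startswith p "ALMA" = b11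
  generalize PySem.Str.startswith p "ROCKY" = b12
  generalize PySem.Str.startswith p "FEDORA" = b13
  generalize PySem.Str.startswith p "FREEBSD" = b14
  generalize PySem.Str.startswith p "COREOS" = b15
  revert b1 b2 b3 b4 b5 b6 b7 b8 b9 b10 b11 b12 b13 b14 b15
  decide

-- A's grouping fold, read off through its keys and per-key contents, is B's dedup-and-filter result.
theorem pv_fold_items (imgs : List (List (String × String))) :
    (imgs.foldl (fun d x => d.modify (pvKeyFor x) [] (fun l => l ++ [x])) PySem.Dict.empty).items
      = (PySem.List.dedup (imgs.map pvKeyFor)).map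
          (fun k => (k, ((imgs.zip (imgs.map pvKeyFor)).filter (fun p => p.2 == k)).map (fun p => p.1))) := by
  have hpairs : imgs.foldl (fun d x => d.modify (pvKeyFor x) [] (fun l => l ++ [x])) PySem.Dict.empty
      = (imgs.map (fun x => (pvKeyFor x, x))).foldl (fun d p => d.modify p.1 [] (fun l => l ++ [p.2])) PySem.Dict.empty := by
    rw [List.foldl_map]
  rw [hpairs]
  have hnd : ((imgs.map (fun x => (pvKeyFor x, x))).foldl
      (fun d p => d.modify p.1 [] (fun l => l ++ [p.2])) PySem.Dict.empty).keys.Nodup := by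
    apply PySem.Dict.nodup_keys_foldl_modify_key
    simp
  rw [PySem.Dict.items_eq_map_keys _ hnd []]
  rw [PySem.Dict.keys_foldl_modify_key]
  have hkeys : PySem.Set.update (PySem.Dict.empty : PySem.Dict String (List (List (String × String)))).keys
        ((imgs.map (fun x => (pvKeyFor x, x))).map Prod.fst)
      = PySem.List.dedup (imgs.map pvKeyFor) := by
    simp [List.map_map, Function.comp_def, PySem.List.dedup_eq_ofList, PySem.Set.ofList_eq_foldl,
      PySem.Set.update, PySem.Dict.keys_empty]
  rw [hkeys]
  apply List.map_congr_left
  intro k hk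
  rw [PySem.Dict.getD_foldl_modify_append]
  rw [← List.map_prod_left_eq_zip]
  simp [List.filter_map, Function.comp_def, List.map_map, PySem.Dict.getD_empty]

theorem pv_ports_eq (images : Option (List (List (String × String)))) :
    categorize_images_py images = categorize_images_py_alt images := by
  have hA : categorize_images_py images
      = ((images.getD []).foldl (fun d x => d.modify (pvKeyFor x) [] (fun l => l ++ [x])) PySem.Dict.empty).items := by
    unfold categorize_images_py
    apply congrArg PySem.Dict.items
    apply List.foldl_ext
    intro buckets img _
    exact congrArg (fun k => buckets.modify k [] (fun l => l ++ [img])) (pv_key_chain_eq (pvPlatform img))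
  rw [hA, pv_fold_items]
  rfl

-- ===== VERDICT (by name: the statement is the Claim_ definition above) =====
theorem categorize_images_py_spec : Claim_equal_categorize_images_py := by
  intro images _
  exact pv_ports_eq images
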